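-- pv_equiv track=rewrite | github.com/Nico-Oz-ops/ITS_Python | Esercizi_Vari/Collection_and_more/Esercizio_recap_17.py | max_min_per_riga
-- ===== SOURCE A (Python) =====
-- def max_min_per_riga(matrice: list[list[int]]) -> list[tuple[int, int]]:
--     risultato = []
--
--     for riga in matrice:
--         valore_max_riga = riga[0]
--         valore_min_riga = riga[0]
--         for valore in riga:
--             if valore > valore_max_riga:
--                 valore_max_riga = valore
--
--             if valore < valore_min_riga:
--                 valore_min_riga = valore
--
--         risultato.append((valore_max_riga, valore_min_riga))
--
--     return risultato
-- ===== SOURCE B (Python) =====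
-- def max_min_per_riga(matrice: list[list[int]]) -> list[tuple[int, int]]:
--     return [(s[-1], s[0]) for s in map(sorted, matrice)]
-- ===== Notes on version B (the rewrite author's own statement) =====
-- stated objective: simpler
-- what changed: Replaces the explicit nested max/min scan with a one-line comprehension that sorts each row and reads the extremes off the ends of the sorted row.
import Mathlib
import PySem

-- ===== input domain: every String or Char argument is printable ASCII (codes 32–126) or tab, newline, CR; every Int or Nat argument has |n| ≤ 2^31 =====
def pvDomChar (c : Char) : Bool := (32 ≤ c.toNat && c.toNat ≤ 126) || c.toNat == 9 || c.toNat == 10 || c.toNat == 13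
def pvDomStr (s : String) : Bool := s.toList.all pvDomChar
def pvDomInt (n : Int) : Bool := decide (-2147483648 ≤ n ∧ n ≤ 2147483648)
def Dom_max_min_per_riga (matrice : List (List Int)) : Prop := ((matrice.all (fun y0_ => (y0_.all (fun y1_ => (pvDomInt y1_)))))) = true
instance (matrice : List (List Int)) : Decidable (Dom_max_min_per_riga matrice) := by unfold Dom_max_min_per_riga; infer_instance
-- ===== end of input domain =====

-- B sorts each row and reads the extremes off the ends of the sorted row (simpler one-liner).

-- ===== PORT A =====
-- literal transliteration: outer loop appends (max, min) computed by the inner scan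
def max_min_per_riga (matrice : List (List Int)) : List (Int × Int) :=
  matrice.foldl (fun risultato riga =>
    let v0 := (PySem.List.pyGet? riga 0).getD 0   -- riga[0]; none (IndexError) excluded by Pre_
    let mm := riga.foldl (fun (p : Int × Int) valore =>
        (if valore > p.1 then valore else p.1, if valore < p.2 then valore else p.2)) (v0, v0)
    risultato ++ [mm]) []

-- ===== PORT B =====
def max_min_per_riga_alt (matrice : List (List Int)) : List (Int × Int) :=
  matrice.map (fun riga =>
    let s := PySem.List.sorted riga (fun x => x) false
    ((PySem.List.pyGet? s (-1)).getD 0, (PySem.List.pyGet? s 0).getD 0))  -- s[-1], s[0]; IndexError excluded by Pre_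

-- ===== PRECONDITION & SPEC =====
-- Pre_ excludes matrices containing an empty row: there both A (riga[0]) and B (s[-1]) raise IndexError.
def Pre_max_min_per_riga (matrice : List (List Int)) : Prop := ∀ riga ∈ matrice, riga ≠ []
instance (matrice : List (List Int)) : Decidable (Pre_max_min_per_riga matrice) := by unfold Pre_max_min_per_riga; infer_instance
def pvWitness_max_min_per_riga : List (List Int) := [[3, 1, 2], [5], [-4, -4, 0]]

def Spec_max_min_per_riga (matrice : List (List Int)) (out : List (Int × Int)) : Prop := out = max_min_per_riga_alt matrice
instance (matrice : List (List Int)) (out : List (Int × Int)) : Decidable (Spec_max_min_per_riga matrice out) := by unfold Spec_max_min_per_riga; infer_instance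

-- ===== CLAIM (what is proved, stated in full; the proofs are below) =====
def Claim_equal_max_min_per_riga : Prop := ∀ (matrice : List (List Int)), Dom_max_min_per_riga matrice → Pre_max_min_per_riga matrice → Spec_max_min_per_riga matrice (max_min_per_riga matrice)

-- ===== LEMMAS AND PROOFS =====

-- A's branch 'if valore > p then valore else p' is max (and dually min)
lemma if_gt_eq_max (a b : Int) : (if b > a then b else a) = max a b := by
  rcases max_choice a b with h | h <;> rw [h] <;> split <;> omega

lemma if_lt_eq_min (a b : Int) : (if b < a then b else a) = min a b := by
  rcases min_choice a b with h | h <;> rw [h] <;> split <;> omega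

-- A's running max is a member of x :: t and an upper bound of it
lemma fold_max_spec (x : Int) (t : List Int) :
    t.foldl max x ∈ x :: t ∧ ∀ y ∈ x :: t, y ≤ t.foldl max x := by
  induction t generalizing x with
  | nil => simp
  | cons h t ih =>
    obtain ⟨ihm, ihb⟩ := ih (max x h)
    refine ⟨?_, ?_⟩
    · simp only [List.foldl_cons]
      rcases List.mem_cons.mp ihm with h1 | h1
      · rw [h1]; rcases max_choice x h with h2 | h2 <;> rw [h2] <;> simp
      · exact List.mem_cons_of_mem _ (List.mem_cons_of_mem _ h1)
    · intro y hy
      have htop := ihb (max x h) (List.mem_cons_self ..)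
      simp only [List.mem_cons] at hy
      rcases hy with rfl | rfl | hy
      · simpa using le_trans (le_max_left y h) htop
      · simpa using le_trans (le_max_right x y) htop
      · simpa using ihb y (List.mem_cons_of_mem _ hy)

lemma fold_min_spec (x : Int) (t : List Int) :
    t.foldl min x ∈ x :: t ∧ ∀ y ∈ x :: t, t.foldl min x ≤ y := by
  induction t generalizing x with
  | nil => simp
  | cons h t ih =>
    obtain ⟨ihm, ihb⟩ := ih (min x h)
    refine ⟨?_, ?_⟩
    · simp only [List.foldl_cons]
      rcases List.mem_cons.mp ihm with h1 | h1
      · rw [h1]; rcases min_choice x h with h2 | h2 <;> rw [h2] <;> simp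
      · exact List.mem_cons_of_mem _ (List.mem_cons_of_mem _ h1)
    · intro y hy
      have htop := ihb (min x h) (List.mem_cons_self ..)
      simp only [List.mem_cons] at hy
      rcases hy with rfl | rfl | hy
      · simpa using le_trans htop (min_le_left y h)
      · simpa using le_trans htop (min_le_right x y)
      · simpa using ihb y (List.mem_cons_of_mem _ hy)

-- per-row agreement: A's scanned (max, min) equals (sorted last, sorted head)
lemma row_eq (riga : List Int) (hne : riga ≠ []) :
    (let v0 := (PySem.List.pyGet? riga 0).getD 0
     riga.foldl (fun (p : Int × Int) valore =>
        (if valore > p.1 then valore else p.1, if valore < p.2 then valore else p.2)) (v0, v0))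
    = (let s := PySem.List.sorted riga (fun x => x) false
       ((PySem.List.pyGet? s (-1)).getD 0, (PySem.List.pyGet? s 0).getD 0)) := by
  obtain ⟨x, t, rfl⟩ := List.exists_cons_of_ne_nil hne
  have hperm := PySem.List.sorted_perm (x :: t) (fun x => x) false
  set s := PySem.List.sorted (x :: t) (fun x => x) false with hs
  have hsne : s ≠ [] := by
    intro h
    have := hperm.length_eq
    simp [h] at this
  obtain ⟨m, u, hcons⟩ := List.exists_cons_of_ne_nil hsne
  -- simplify both sides
  simp only [PySem.List.pyGet?_zero, PySem.List.pyGet?_neg_one,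
    List.getElem?_cons_zero, Option.getD_some,
    if_gt_eq_max, if_lt_eq_min, List.foldl_cons, max_self, min_self]
  rw [PySem.List.foldl_prod_mk (f := fun a b => max a b) (g := fun a b => min a b),
    List.getLast?_eq_some_getLast (h := hsne), Option.getD_some]
  have hheadv : s[0]?.getD 0 = m := by simp [hcons]
  obtain ⟨hmaxm, hmaxb⟩ := fold_max_spec x t
  obtain ⟨hminm, hminb⟩ := fold_min_spec x t
  -- head of s is a lower bound of riga, last of s an upper bound; both are members
  have hmle : ∀ y ∈ x :: t, m ≤ y := fun y hy =>
    PySem.List.key_head_sorted_le (x :: t) (fun x => x) hcons y hy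
  have hmmem : m ∈ x :: t := hperm.mem_iff.mp (by simp [hcons])
  have hlmem : s.getLast hsne ∈ x :: t := hperm.mem_iff.mp (List.getLast_mem hsne)
  have hlge : ∀ y ∈ x :: t, y ≤ s.getLast hsne := by
    intro y hy
    obtain ⟨i, hi, hget⟩ := List.getElem_of_mem (hperm.mem_iff.mpr hy)
    rw [List.getLast_eq_getElem]
    have := PySem.List.key_sorted_getElem_mono (xs := x :: t) (key := fun x => x)
      (p := i) (q := s.length - 1) (by omega) (by rw [← hs]; omega)
    simpa [← hs, hget] using this
  rw [hheadv]
  exact Prod.ext (le_antisymm (hlge _ hmaxm) (hmaxb _ hlmem))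
                 (le_antisymm (hminb _ hmmem) (hmle _ hminm))

-- ===== VERDICT (by name: the statement is the Claim_ definition above) =====
theorem max_min_per_riga_spec : Claim_equal_max_min_per_riga := by
  intro matrice _ hpre
  unfold Spec_max_min_per_riga max_min_per_riga max_min_per_riga_alt
  rw [PySem.List.foldl_append_singleton_eq_map]
  simp only [List.nil_append]
  apply List.map_congr_left
  intro riga hriga
  exact row_eq riga (hpre riga hriga)
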